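-- pv_equiv track=rewrite | github.com/ro9er117911/matsim-example-project | pt2matsim/tools/filter_gtfs_bbox.py | limit_trip_ids
-- ===== SOURCE A (Python) =====
-- from collections import defaultdict
-- from typing import Dict, Iterable, List, Sequence, Set, Tuple
--
-- def limit_trip_ids(
--     selected_trip_ids: Set[str],
--     trips_rows: Sequence[Dict[str, str]],
--     limit: int,
-- ) -> Set[str]:
--     if limit <= 0:
--         return selected_trip_ids
--     counters: Dict[str, int] = defaultdict(int)
--     kept: Set[str] = set()
--     for row in trips_rows:
--         trip_id = (row.get("trip_id") or "").strip()
--         if trip_id not in selected_trip_ids: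
--             continue
--         route_id = (row.get("route_id") or "").strip()
--         if counters[route_id] >= limit:
--             continue
--         counters[route_id] += 1
--         kept.add(trip_id)
--     return kept
-- ===== SOURCE B (Python) =====
-- def limit_trip_ids(selected_trip_ids, trips_rows, limit):
--     if limit <= 0:
--         return selected_trip_ids
--     # group the row numbers of the selected trips by their (cleaned) route id
--     by_route = {}
--     for i, row in enumerate(trips_rows):
--         trip_id = (row.get("trip_id") or "").strip()
--         if trip_id in selected_trip_ids:
--             route_id = (row.get("route_id") or "").strip()
--             by_route.setdefault(route_id, []).append(i)
--     # keep the first `limit` rows of every route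
--     keep_rows = set()
--     for rows in by_route.values():
--         keep_rows.update(rows[:limit])
--     # collect the trip ids of the kept rows in file order (deterministic result)
--     kept = set()
--     for i, row in enumerate(trips_rows):
--         if i in keep_rows:
--             kept.add((row.get("trip_id") or "").strip())
--     return kept
-- ===== Notes on version B (the rewrite author's own statement) =====
-- stated objective: alternative
-- what changed: Replaces A's single streaming pass with a per-route counter by a staged grouping decomposition: group the selected rows' indices by route into a dict, take the first `limit` indices of every group into a kept-row set, then collect the trip ids of the kept rows.
import Mathlib
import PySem

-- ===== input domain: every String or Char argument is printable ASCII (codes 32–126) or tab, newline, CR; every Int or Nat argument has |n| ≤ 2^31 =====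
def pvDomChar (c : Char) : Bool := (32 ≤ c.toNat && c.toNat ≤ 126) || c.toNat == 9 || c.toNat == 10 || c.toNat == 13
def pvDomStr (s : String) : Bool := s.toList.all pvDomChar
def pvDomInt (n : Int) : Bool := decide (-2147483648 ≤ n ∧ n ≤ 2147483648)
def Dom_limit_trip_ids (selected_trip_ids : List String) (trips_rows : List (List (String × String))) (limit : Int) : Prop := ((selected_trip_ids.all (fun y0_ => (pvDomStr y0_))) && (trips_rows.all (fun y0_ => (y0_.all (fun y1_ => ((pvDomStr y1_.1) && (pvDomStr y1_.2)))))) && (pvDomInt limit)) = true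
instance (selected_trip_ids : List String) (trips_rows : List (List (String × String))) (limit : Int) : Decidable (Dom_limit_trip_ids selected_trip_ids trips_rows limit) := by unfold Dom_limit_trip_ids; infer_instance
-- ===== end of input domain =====

-- B replaces A's single streaming pass with a per-route counter by a staged grouping decomposition
-- (group selected row indices by route, keep the first `limit` of each group, collect their trip ids);
-- same return value, no speed claim.

-- (row.get(k) or "").strip(), shared by both ports (identical in Source A and Source B)
def pvField (row : List (String × String)) (k : String) : String :=
  PySem.Str.strip (((PySem.Dict.mk row).get? k).getD "")

-- ===== PORT A =====
-- loop body of A's single pass: state = (counters, kept)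
def pvAStep (selected_trip_ids : List String) (limit : Int)
    (st : PySem.Dict String Int × List String) (row : List (String × String)) :
    PySem.Dict String Int × List String :=
  let trip_id := pvField row "trip_id"
  if selected_trip_ids.contains trip_id then
    let route_id := pvField row "route_id"
    if st.1.getD route_id 0 ≥ limit then st
    else (st.1.insert route_id (st.1.getD route_id 0 + 1), PySem.Set.add st.2 trip_id)
  else st

def limit_trip_ids (selected_trip_ids : List String) (trips_rows : List (List (String × String))) (limit : Int) : List String :=
  if limit ≤ 0 then selected_trip_ids
  else (trips_rows.foldl (pvAStep selected_trip_ids limit) (PySem.Dict.empty, [])).2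

-- ===== PORT B =====
-- first loop: by_route.setdefault(route_id, []).append(i) for the selected rows
def pvGroupStep (selected_trip_ids : List String)
    (d : PySem.Dict String (List Int)) (p : Int × List (String × String)) :
    PySem.Dict String (List Int) :=
  let trip_id := pvField p.2 "trip_id"
  if selected_trip_ids.contains trip_id then
    let route_id := pvField p.2 "route_id"
    d.insert route_id (d.getD route_id [] ++ [p.1])
  else d

-- second loop: keep_rows.update(rows[:limit])
def pvKeepStep (limit : Int) (s : PySem.Set Int) (v : List Int) : PySem.Set Int :=
  PySem.Set.update s (PySem.List.slice v none (some limit))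

-- third loop: if i in keep_rows: kept.add(trip_id)
def pvCollectStep (keep : PySem.Set Int)
    (kept : PySem.Set String) (p : Int × List (String × String)) : PySem.Set String :=
  if PySem.Set.contains keep p.1 then PySem.Set.add kept (pvField p.2 "trip_id") else kept

def limit_trip_ids_alt (selected_trip_ids : List String) (trips_rows : List (List (String × String))) (limit : Int) : List String :=
  if limit ≤ 0 then selected_trip_ids
  else
    let byRoute := (PySem.List.enumerate trips_rows 0).foldl (pvGroupStep selected_trip_ids) PySem.Dict.empty
    let keepRows := byRoute.values.foldl (pvKeepStep limit) PySem.Set.empty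
    (PySem.List.enumerate trips_rows 0).foldl (pvCollectStep keepRows) PySem.Set.empty

-- ===== PRECONDITION & SPEC =====
def Spec_limit_trip_ids (selected_trip_ids : List String) (trips_rows : List (List (String × String))) (limit : Int) (out : List String) : Prop := out = limit_trip_ids_alt selected_trip_ids trips_rows limit
instance (selected_trip_ids : List String) (trips_rows : List (List (String × String))) (limit : Int) (out : List String) : Decidable (Spec_limit_trip_ids selected_trip_ids trips_rows limit out) := by unfold Spec_limit_trip_ids; infer_instance

-- ===== CLAIM (what is proved, stated in full; the proofs are below) =====
def Claim_equal_limit_trip_ids : Prop := ∀ (selected_trip_ids : List String) (trips_rows : List (List (String × String))) (limit : Int), Dom_limit_trip_ids selected_trip_ids trips_rows limit → Spec_limit_trip_ids selected_trip_ids trips_rows limit (limit_trip_ids selected_trip_ids trips_rows limit)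

-- ===== LEMMAS AND PROOFS =====

-- the cleaned (index, trip_id, route_id) triples of the selected rows, indices from n
def pvIPairs (sel : List String) (n : Int) : List (List (String × String)) → List (Int × String × String)
  | [] => []
  | row :: rest =>
      if sel.contains (pvField row "trip_id")
      then (n, pvField row "trip_id", pvField row "route_id") :: pvIPairs sel (n + 1) rest
      else pvIPairs sel (n + 1) rest

-- A's step, expressed on a cleaned triple (the index is ignored)
def pvAStepP (limit : Int) (st : PySem.Dict String Int × List String) (p : Int × String × String) :
    PySem.Dict String Int × List String :=
  if st.1.getD p.2.2 0 ≥ limit then st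
  else (st.1.insert p.2.2 (st.1.getD p.2.2 0 + 1), PySem.Set.add st.2 p.2.1)

-- rank form of A's loop: state = (kept, seen routes)
def pvRankStep (limit : Int) (st : List String × List String) (p : Int × String × String) :
    List String × List String :=
  ((if ((st.2.countP (fun x => x == p.2.2) : Int) < limit) then PySem.Set.add st.1 p.2.1 else st.1),
   st.2 ++ [p.2.2])

-- the triples kept by the rank rule, given the routes already seen
def pvGoodP (limit : Int) : List (Int × String × String) → List String → List (Int × String × String)
  | [], _ => []
  | p :: rest, seen =>
      (if ((seen.countP (fun x => x == p.2.2) : Int) < limit) then [p] else []) ++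
        pvGoodP limit rest (seen ++ [p.2.2])

-- the indices of the triples of route r, in order
def pvGrp (L : List (Int × String × String)) (r : String) : List Int :=
  L.filterMap (fun p => if p.2.2 == r then some p.1 else none)

theorem afold_eq (sel : List String) (limit : Int) :
    ∀ (rows : List (List (String × String))) (n : Int) (st : PySem.Dict String Int × List String),
      rows.foldl (pvAStep sel limit) st = (pvIPairs sel n rows).foldl (pvAStepP limit) st := by
  intro rows
  induction rows with
  | nil => intro n st; simp [pvIPairs]
  | cons row rest ih =>
      intro n st
      simp only [List.foldl_cons, pvAStep, pvIPairs]
      by_cases h : pvField row "trip_id" ∈ sel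
      · simp [h, ih (n + 1), pvAStepP]
      · simp [h, ih (n + 1)]

theorem main_inv (limit : Int) :
    ∀ (l : List (Int × String × String)) (d : PySem.Dict String Int) (rs kept : List String),
      (∀ r, d.getD r 0 = min ((rs.countP (fun x => x == r) : Int)) limit) →
      (l.foldl (pvAStepP limit) (d, kept)).2 = (l.foldl (pvRankStep limit) (kept, rs)).1 := by
  intro l
  induction l with
  | nil => intro d rs kept _; rfl
  | cons p rest ih =>
      intro d rs kept H
      simp only [List.foldl_cons, pvAStepP, pvRankStep]
      have hc := H p.2.2
      by_cases hge : d.getD p.2.2 0 ≥ limit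
      · have hcount : ¬ ((rs.countP (fun x => x == p.2.2) : Int) < limit) := by
          rw [hc] at hge; omega
        simp only [hge, hcount, if_true, if_false]
        apply ih
        intro r
        by_cases hr : r = p.2.2
        · subst hr
          rw [hc, List.countP_append]
          simp only [List.countP_cons, List.countP_nil, beq_self_eq_true, if_pos]
          rw [hc] at hge
          push_cast
          omega
        · have : (rs ++ [p.2.2]).countP (fun x => x == r) = rs.countP (fun x => x == r) := by
            rw [List.countP_append]
            simp [beq_iff_eq, Ne.symm hr]
          rw [this, H r]
      · have hcount : (rs.countP (fun x => x == p.2.2) : Int) < limit := by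
          rw [hc] at hge; omega
        simp only [hge, hcount, if_true, if_false]
        apply ih
        intro r
        rw [PySem.Dict.getD_insert]
        by_cases hr : r = p.2.2
        · subst hr
          rw [if_pos rfl, hc, List.countP_append]
          simp only [List.countP_cons, List.countP_nil, beq_self_eq_true]
          push_cast
          omega
        · rw [if_neg hr]
          have : (rs ++ [p.2.2]).countP (fun x => x == r) = rs.countP (fun x => x == r) := by
            rw [List.countP_append]
            simp [beq_iff_eq, Ne.symm hr]
          rw [this, H r]

theorem rank_eq_goodP (limit : Int) :
    ∀ (l : List (Int × String × String)) (seen kept : List String),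
      (l.foldl (pvRankStep limit) (kept, seen)).1 =
        (pvGoodP limit l seen).foldl (fun k p => PySem.Set.add k p.2.1) kept := by
  intro l
  induction l with
  | nil => intro seen kept; rfl
  | cons p rest ih =>
      intro seen kept
      simp only [List.foldl_cons, pvRankStep, pvGoodP]
      by_cases h : ((seen.countP (fun x => x == p.2.2) : Int) < limit)
      · simp [h, ih]
      · simp [h, ih]

theorem ipairs_lb (sel : List String) :
    ∀ (rows : List (List (String × String))) (n : Int) (p : Int × String × String),
      p ∈ pvIPairs sel n rows → n ≤ p.1 := by
  intro rows
  induction rows with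
  | nil => intro n p hp; simp [pvIPairs] at hp
  | cons row rest ih =>
      intro n p hp
      simp only [pvIPairs] at hp
      by_cases h : sel.contains (pvField row "trip_id")
      · rw [if_pos h] at hp
        rcases List.mem_cons.mp hp with h1 | h1
        · subst h1; omega
        · have := ih (n + 1) p h1; omega
      · rw [if_neg h] at hp
        have := ih (n + 1) p hp; omega

theorem goodP_sub (limit : Int) :
    ∀ (l : List (Int × String × String)) (seen : List String) (p : Int × String × String),
      p ∈ pvGoodP limit l seen → p ∈ l := by
  intro l
  induction l with
  | nil => intro seen p hp; simp [pvGoodP] at hp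
  | cons q rest ih =>
      intro seen p hp
      simp only [pvGoodP, List.mem_append] at hp
      rcases hp with h1 | h1
      · split at h1
        · simp at h1; simp [h1]
        · simp at h1
      · exact List.mem_cons_of_mem _ (ih _ p h1)

theorem grp_sub (l : List (Int × String × String)) (r : String) (j : Int)
    (hj : j ∈ pvGrp l r) : j ∈ l.map (·.1) := by
  simp only [pvGrp, List.mem_filterMap] at hj
  rcases hj with ⟨p, hp, he⟩
  split at he
  · simp only [Option.some.injEq] at he
    exact List.mem_map.mpr ⟨p, hp, he⟩
  · simp at he

theorem group_getD (sel : List String) :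
    ∀ (rows : List (List (String × String))) (n : Int) (d : PySem.Dict String (List Int)) (r : String),
      ((PySem.List.enumerate rows n).foldl (pvGroupStep sel) d).getD r [] =
        d.getD r [] ++ pvGrp (pvIPairs sel n rows) r := by
  intro rows
  induction rows with
  | nil => intro n d r; simp [pvIPairs, pvGrp, PySem.List.enumerate]
  | cons row rest ih =>
      intro n d r
      rw [PySem.List.enumerate_cons]
      simp only [List.foldl_cons, pvGroupStep, pvIPairs]
      by_cases h : sel.contains (pvField row "trip_id")
      · rw [if_pos h, if_pos h, ih (n + 1)]
        simp only [pvGrp, List.filterMap_cons]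
        rw [PySem.Dict.getD_insert]
        by_cases hr : r = pvField row "route_id"
        · subst hr
          simp only [beq_self_eq_true]
          simp
        · rw [if_neg hr]
          have : (pvField row "route_id" == r) = false := by
            simp; exact fun hh => hr hh.symm
          simp [this]
      · rw [if_neg h, if_neg h, ih (n + 1)]

theorem group_keys_nodup (sel : List String) (l : List (Int × List (String × String))) :
    ((l.foldl (pvGroupStep sel) PySem.Dict.empty).keys).Nodup := by
  have h : l.foldl (pvGroupStep sel) PySem.Dict.empty =
      (l.filter (fun p => sel.contains (pvField p.2 "trip_id"))).foldl
        (fun d p => d.insert (pvField p.2 "route_id") (d.getD (pvField p.2 "route_id") [] ++ [p.1]))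
        PySem.Dict.empty := by
    rw [← PySem.List.foldl_if_eq_foldl_filter]
    apply PySem.List.foldl_congr_mem
    intro acc x _
    simp [pvGroupStep]
  rw [h]
  exact PySem.Dict.nodup_keys_foldl_insert_key _ _ _ _ PySem.Dict.nodup_keys_empty

theorem mem_foldl_keep (limit : Int) :
    ∀ (vs : List (List Int)) (s : PySem.Set Int) (j : Int),
      j ∈ vs.foldl (pvKeepStep limit) s ↔
        j ∈ s ∨ ∃ v ∈ vs, j ∈ PySem.List.slice v none (some limit) := by
  intro vs
  induction vs with
  | nil => intro s j; simp
  | cons v rest ih =>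
      intro s j
      simp only [List.foldl_cons, pvKeepStep, ih, PySem.Set.mem_update, List.mem_cons]
      constructor
      · rintro (⟨h | h⟩ | ⟨w, hw, hj⟩)
        · exact Or.inl h
        · exact Or.inr ⟨v, Or.inl rfl, h⟩
        · exact Or.inr ⟨w, Or.inr hw, hj⟩
      · rintro (h | ⟨w, hw | hw, hj⟩)
        · exact Or.inl (Or.inl h)
        · subst hw; exact Or.inl (Or.inr hj)
        · exact Or.inr ⟨w, hw, hj⟩

-- membership in the keep-row set = membership in the first `limit` indices of some route group
theorem mem_keep_iff (sel : List String) (limit : Int) (hlim : 0 ≤ limit)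
    (rows : List (List (String × String))) (j : Int) :
    (j ∈ ((PySem.List.enumerate rows 0).foldl (pvGroupStep sel) PySem.Dict.empty).values.foldl
        (pvKeepStep limit) PySem.Set.empty) ↔
      ∃ r, j ∈ (pvGrp (pvIPairs sel 0 rows) r).take limit.toNat := by
  set D := (PySem.List.enumerate rows 0).foldl (pvGroupStep sel) PySem.Dict.empty with hD
  have hnd : D.keys.Nodup := group_keys_nodup sel _
  have hget : ∀ r, D.getD r [] = pvGrp (pvIPairs sel 0 rows) r := by
    intro r
    rw [hD, group_getD sel rows 0 PySem.Dict.empty r]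
    simp
  rw [mem_foldl_keep]
  simp only [PySem.Set.empty]
  constructor
  · rintro (h | ⟨v, hv, hj⟩)
    · simp at h
    · rw [PySem.Dict.values_eq_map_keys D hnd []] at hv
      rcases List.mem_map.mp hv with ⟨r, _, hr⟩
      refine ⟨r, ?_⟩
      rw [← hget r, hr]
      rwa [PySem.List.slice_to _ hlim] at hj
  · rintro ⟨r, hj⟩
    right
    refine ⟨D.getD r [], ?_, ?_⟩
    · rw [PySem.Dict.values_eq_map_keys D hnd []]
      apply List.mem_map_of_mem
      by_contra hk
      have hc : D.contains r = false := by
        rcases Bool.eq_false_or_eq_true (D.contains r) with h | h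
        · exact absurd ((PySem.Dict.contains_iff_mem_keys D r).mp h) hk
        · exact h
      have : D.getD r [] = [] := PySem.Dict.getD_of_not_contains D [] hc
      rw [hget r] at this
      rw [this] at hj
      simp at hj
    · rw [PySem.List.slice_to _ hlim, hget r]
      exact hj

-- an index is kept by the rank rule iff it is among the first (limit - seen count) of its group
theorem mem_goodP_iff (limit : Int) :
    ∀ (l : List (Int × String × String)) (seen : List String),
      l.Pairwise (fun p q => p.1 < q.1) →
      ∀ j : Int,
        (j ∈ (pvGoodP limit l seen).map (·.1) ↔
          ∃ r, j ∈ (pvGrp l r).take (limit - (seen.countP (fun x => x == r) : Int)).toNat) := by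
  intro l
  induction l with
  | nil =>
      intro seen _ j
      simp [pvGoodP, pvGrp]
  | cons p rest ih =>
      intro seen hpw j
      have hhead : ∀ q ∈ rest, p.1 < q.1 := (List.pairwise_cons.mp hpw).1
      have hrest := (List.pairwise_cons.mp hpw).2
      have hnotrest : ∀ (s : List String), p.1 ∉ (pvGoodP limit rest s).map (·.1) := by
        intro s hmem
        rcases List.mem_map.mp hmem with ⟨q, hq, he⟩
        have := hhead q (goodP_sub limit rest s q hq)
        omega
      have hgrp_cons : ∀ r, pvGrp (p :: rest) r =
          (if p.2.2 == r then p.1 :: pvGrp rest r else pvGrp rest r) := by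
        intro r
        simp only [pvGrp, List.filterMap_cons]
        split <;> simp_all
      have hcnt : ∀ r, ((seen ++ [p.2.2]).countP (fun x => x == r) : Int) =
          (seen.countP (fun x => x == r) : Int) + (if p.2.2 == r then 1 else 0) := by
        intro r
        rw [List.countP_append]
        push_cast
        simp only [List.countP_cons, List.countP_nil]
        split <;> simp_all
      by_cases hj : j = p.1
      · subst hj
        simp only [pvGoodP, List.map_append, List.mem_append]
        constructor
        · rintro h
          have hc : ((seen.countP (fun x => x == p.2.2) : Int) < limit) := by
            rcases h with h | h
            · split at h
              · assumption
              · simp at h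
            · exact absurd h (hnotrest _)
          refine ⟨p.2.2, ?_⟩
          rw [hgrp_cons]
          simp only [beq_self_eq_true, if_pos]
          have hk : ∃ m : Nat, (limit - (seen.countP (fun x => x == p.2.2) : Int)).toNat = m + 1 := by
            refine ⟨(limit - (seen.countP (fun x => x == p.2.2) : Int)).toNat - 1, by omega⟩
          rcases hk with ⟨m, hm⟩
          rw [hm, List.take_succ_cons]
          exact List.mem_cons_self
        · rintro ⟨r, hr⟩
          rw [hgrp_cons] at hr
          by_cases hbe : (p.2.2 == r) = true
          · rw [if_pos hbe] at hr
            left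
            have hne : (limit - (seen.countP (fun x => x == r) : Int)).toNat ≠ 0 := by
              intro h0
              rw [h0] at hr
              simp at hr
            have hc : ((seen.countP (fun x => x == p.2.2) : Int) < limit) := by
              have : r = p.2.2 := (beq_iff_eq.mp hbe).symm
              subst this
              omega
            simp [hc]
          · rw [if_neg hbe] at hr
            exfalso
            have : p.1 ∈ (pvGrp rest r) := List.take_subset _ _ hr
            have := grp_sub rest r p.1 this
            rcases List.mem_map.mp this with ⟨q, hq, he⟩
            have := hhead q hq
            omega
      · -- j ≠ p.1 : reduce both sides to the tail
        have hL : (j ∈ (pvGoodP limit (p :: rest) seen).map (·.1)) ↔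
            j ∈ (pvGoodP limit rest (seen ++ [p.2.2])).map (·.1) := by
          simp only [pvGoodP, List.map_append, List.mem_append]
          constructor
          · rintro (h | h)
            · split at h <;> simp_all
            · exact h
          · exact fun h => Or.inr h
        rw [hL, ih (seen ++ [p.2.2]) hrest j]
        constructor
        · rintro ⟨r, hr⟩
          refine ⟨r, ?_⟩
          rw [hgrp_cons]
          rw [hcnt] at hr
          by_cases hbe : (p.2.2 == r) = true
          · rw [if_pos hbe]
            rw [if_pos hbe] at hr
            have hk : ∃ m : Nat, (limit - ((seen.countP (fun x => x == r) : Int))).toNat = m →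
                True := ⟨0, fun _ => trivial⟩
            rcases Nat.eq_zero_or_pos (limit - ((seen.countP (fun x => x == r) : Int))).toNat with h0 | hpos
            · have : (limit - ((seen.countP (fun x => x == r) : Int) + 1)).toNat = 0 := by omega
              rw [this] at hr
              simp at hr
            · have hm : (limit - ((seen.countP (fun x => x == r) : Int))).toNat =
                  ((limit - ((seen.countP (fun x => x == r) : Int) + 1)).toNat) + 1 := by omega
              rw [hm, List.take_succ_cons]
              exact List.mem_cons_of_mem _ hr
          · rw [if_neg hbe]
            rw [if_neg hbe] at hr
            simpa using hr
        · rintro ⟨r, hr⟩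
          refine ⟨r, ?_⟩
          rw [hgrp_cons] at hr
          rw [hcnt]
          by_cases hbe : (p.2.2 == r) = true
          · rw [if_pos hbe]
            rw [if_pos hbe] at hr
            rcases Nat.eq_zero_or_pos (limit - ((seen.countP (fun x => x == r) : Int))).toNat with h0 | hpos
            · rw [h0] at hr
              simp at hr
            · have hm : (limit - ((seen.countP (fun x => x == r) : Int))).toNat =
                  ((limit - ((seen.countP (fun x => x == r) : Int) + 1)).toNat) + 1 := by omega
              rw [hm, List.take_succ_cons] at hr
              rcases List.mem_cons.mp hr with h | h
              · exact absurd h hj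
              · exact h
          · rw [if_neg hbe]
            rw [if_neg hbe] at hr
            simpa using hr

theorem ipairs_pairwise (sel : List String) :
    ∀ (rows : List (List (String × String))) (n : Int),
      (pvIPairs sel n rows).Pairwise (fun p q => p.1 < q.1) := by
  intro rows
  induction rows with
  | nil => intro n; simp [pvIPairs]
  | cons row rest ih =>
      intro n
      simp only [pvIPairs]
      split
      · refine List.pairwise_cons.mpr ⟨?_, ih (n + 1)⟩
        intro q hq
        have := ipairs_lb sel rest (n + 1) q hq
        simpa using by omega
      · exact ih (n + 1)

theorem collect_eq (sel : List String) (limit : Int) (keep : PySem.Set Int) :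
    ∀ (rows : List (List (String × String))) (n : Int) (seen : List String) (kept : PySem.Set String),
      (∀ p ∈ pvIPairs sel n rows,
        (PySem.Set.contains keep p.1 = true ↔
          p.1 ∈ (pvGoodP limit (pvIPairs sel n rows) seen).map (·.1))) →
      (∀ j, PySem.Set.contains keep j = true → j < n ∨ j ∈ (pvIPairs sel n rows).map (·.1)) →
      (PySem.List.enumerate rows n).foldl (pvCollectStep keep) kept =
        (pvGoodP limit (pvIPairs sel n rows) seen).foldl (fun k p => PySem.Set.add k p.2.1) kept := by
  intro rows
  induction rows with
  | nil =>
      intro n seen kept _ _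
      simp [PySem.List.enumerate, pvIPairs, pvGoodP]
  | cons row rest ih =>
      intro n seen kept h1 h2
      rw [PySem.List.enumerate_cons]
      simp only [List.foldl_cons]
      by_cases hsel : sel.contains (pvField row "trip_id") = true
      · have hpairs : pvIPairs sel n (row :: rest) =
            (n, pvField row "trip_id", pvField row "route_id") :: pvIPairs sel (n + 1) rest := by
          simp only [pvIPairs]
          rw [if_pos hsel]
        have hnotail : n ∉ (pvGoodP limit (pvIPairs sel (n + 1) rest)
            (seen ++ [pvField row "route_id"])).map (·.1) := by
          intro hmem
          rcases List.mem_map.mp hmem with ⟨w, hw, he⟩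
          have := ipairs_lb sel rest (n + 1) w (goodP_sub limit _ _ w hw)
          omega
        have hcn : PySem.Set.contains keep n = true ↔
            ((seen.countP (fun x => x == pvField row "route_id") : Int) < limit) := by
          rw [hpairs] at h1
          rw [h1 _ List.mem_cons_self]
          simp only [pvGoodP, List.map_append, List.mem_append]
          constructor
          · rintro (h | h)
            · split at h
              · assumption
              · simp at h
            · exact absurd h hnotail
          · intro hc
            left
            simp [hc]
        have h1' : ∀ p ∈ pvIPairs sel (n + 1) rest,
            (PySem.Set.contains keep p.1 = true ↔
              p.1 ∈ (pvGoodP limit (pvIPairs sel (n + 1) rest)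
                (seen ++ [pvField row "route_id"])).map (·.1)) := by
          intro p hp
          have hlb := ipairs_lb sel rest (n + 1) p hp
          rw [hpairs] at h1
          rw [h1 p (List.mem_cons_of_mem _ hp)]
          simp only [pvGoodP, List.map_append, List.mem_append]
          constructor
          · rintro (h | h)
            · exfalso
              split at h
              · simp at h
                omega
              · simp at h
            · exact h
          · exact fun h => Or.inr h
        have h2' : ∀ j, PySem.Set.contains keep j = true →
            j < n + 1 ∨ j ∈ (pvIPairs sel (n + 1) rest).map (·.1) := by
          intro j hjj
          rcases h2 j hjj with h | h
          · left; omega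
          · rw [hpairs] at h
            simp only [List.map_cons, List.mem_cons] at h
            rcases h with h | h
            · left; omega
            · right; exact h
        rw [hpairs]
        simp only [pvGoodP]
        by_cases hc : ((seen.countP (fun x => x == pvField row "route_id") : Int) < limit)
        · have hkn : PySem.Set.contains keep n = true := hcn.mpr hc
          simp only [pvCollectStep, hkn, if_pos, hc, List.foldl_cons, List.singleton_append]
          exact ih (n + 1) (seen ++ [pvField row "route_id"]) _ h1' h2'
        · have hkn : PySem.Set.contains keep n = false := by
            rcases Bool.eq_false_or_eq_true (PySem.Set.contains keep n) with h | h
            · exact absurd (hcn.mp h) hc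
            · exact h
          simp only [pvCollectStep, hkn, hc, if_false, List.nil_append, Bool.false_eq_true]
          exact ih (n + 1) (seen ++ [pvField row "route_id"]) kept h1' h2'
      · have hpairs : pvIPairs sel n (row :: rest) = pvIPairs sel (n + 1) rest := by
          simp only [pvIPairs]
          rw [if_neg hsel]
        have hkn : PySem.Set.contains keep n = false := by
          rcases Bool.eq_false_or_eq_true (PySem.Set.contains keep n) with h | h
          · exfalso
            rcases h2 n h with hlt | hmem
            · omega
            · rw [hpairs] at hmem
              rcases List.mem_map.mp hmem with ⟨w, hw, he⟩
              have := ipairs_lb sel rest (n + 1) w hw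
              omega
          · exact h
        simp only [pvCollectStep, hkn, Bool.false_eq_true, if_false]
        rw [hpairs]
        apply ih (n + 1) seen kept
        · intro p hp
          have := h1 p (by rw [hpairs]; exact hp)
          rwa [hpairs] at this
        · intro j hjj
          rcases h2 j hjj with h | h
          · left; omega
          · rw [hpairs] at h
            right; exact h

-- ===== VERDICT (by name: the statement is the Claim_ definition above) =====
theorem limit_trip_ids_spec : Claim_equal_limit_trip_ids := by
  intro sel rows limit _
  unfold Spec_limit_trip_ids limit_trip_ids limit_trip_ids_alt
  by_cases h : limit ≤ 0
  · simp [h]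
  · simp only [h, if_false]
    have hlim : 0 < limit := by omega
    rw [afold_eq sel limit rows 0,
        main_inv limit _ PySem.Dict.empty [] []
          (by intro r; simp [PySem.Dict.getD_empty]; omega),
        rank_eq_goodP]
    refine (collect_eq sel limit _ rows 0 [] [] ?_ ?_).symm
    · intro p _
      rw [PySem.Set.contains_iff,
          mem_keep_iff sel limit (le_of_lt hlim) rows p.1,
          mem_goodP_iff limit (pvIPairs sel 0 rows) [] (ipairs_pairwise sel rows 0) p.1]
      simp
    · intro j hj
      right
      rw [PySem.Set.contains_iff, mem_keep_iff sel limit (le_of_lt hlim) rows j] at hj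
      rcases hj with ⟨r, hr⟩
      exact grp_sub _ r j (List.take_subset _ _ hr)
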